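-- pv_equiv track=rewrite | github.com/glwhappen/find_papers_by_reviewers | 匹配审稿人和论文.py | find_papers_by_reviewers
-- ===== SOURCE A (Python) =====
-- def find_papers_by_reviewers(titles, authors, reviewers):
--     papers_by_reviewers = {}
--     for reviewer in reviewers:
--         for title, author_list in zip(titles, authors):
--             if reviewer in author_list:
--                 if reviewer not in papers_by_reviewers:
--                     papers_by_reviewers[reviewer] = []
--                 papers_by_reviewers[reviewer].append(title)
--     return papers_by_reviewers
-- ===== SOURCE B (Python) =====
-- def find_papers_by_reviewers(titles, authors, reviewers):
--     index = {}
--     for title, author_list in zip(titles, authors):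
--         for author in set(author_list):
--             index.setdefault(author, []).append(title)
--     result = {}
--     for reviewer in reviewers:
--         if reviewer in index:
--             result.setdefault(reviewer, []).extend(index[reviewer])
--     return result
-- ===== Notes on version B (the rewrite author's own statement) =====
-- stated objective: faster
-- what changed: Replaces the per-reviewer scan over all papers by an inverted author-to-titles index built once, then a single dictionary lookup per reviewer.
import Mathlib
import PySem

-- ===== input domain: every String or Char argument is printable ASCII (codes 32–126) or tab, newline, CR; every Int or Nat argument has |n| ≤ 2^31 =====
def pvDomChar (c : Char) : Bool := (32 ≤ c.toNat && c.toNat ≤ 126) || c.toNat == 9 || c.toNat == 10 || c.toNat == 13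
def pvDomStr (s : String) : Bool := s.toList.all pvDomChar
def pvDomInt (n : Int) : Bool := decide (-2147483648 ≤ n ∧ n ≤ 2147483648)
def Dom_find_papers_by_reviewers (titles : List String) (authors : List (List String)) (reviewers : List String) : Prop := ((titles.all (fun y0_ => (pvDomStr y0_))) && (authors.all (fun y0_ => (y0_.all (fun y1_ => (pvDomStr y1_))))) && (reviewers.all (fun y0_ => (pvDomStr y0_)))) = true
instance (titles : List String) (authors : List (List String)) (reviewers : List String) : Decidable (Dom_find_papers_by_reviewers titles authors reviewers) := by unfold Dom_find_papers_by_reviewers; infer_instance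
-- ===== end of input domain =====

-- B builds an inverted author→titles index once and does one lookup per reviewer, instead of A's scan over all papers for every reviewer.

-- ===== PORT A =====
def find_papers_by_reviewers (titles : List String) (authors : List (List String)) (reviewers : List String) : List (String × List String) :=
  (reviewers.foldl (fun papers_by_reviewers reviewer =>
      (titles.zip authors).foldl (fun papers_by_reviewers ta =>
          if reviewer ∈ ta.2 then
            let papers_by_reviewers :=
              if papers_by_reviewers.contains reviewer then papers_by_reviewers
              else papers_by_reviewers.insert reviewer []
            papers_by_reviewers.modify reviewer [] (fun l => l ++ [ta.1])
          else papers_by_reviewers)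
        papers_by_reviewers)
    (PySem.Dict.empty : PySem.Dict String (List String))).items

-- ===== PORT B =====
-- build the author → titles index (Source B's first loop)
def fpbrIndex (titles : List String) (authors : List (List String)) : PySem.Dict String (List String) :=
  (titles.zip authors).foldl (fun index ta =>
      (PySem.Set.ofList ta.2).foldl (fun index author =>
          (index.setdefault author []).modify author [] (fun l => l ++ [ta.1]))
        index)
    PySem.Dict.empty

def find_papers_by_reviewers_alt (titles : List String) (authors : List (List String)) (reviewers : List String) : List (String × List String) :=
  let index := fpbrIndex titles authors
  (reviewers.foldl (fun result reviewer =>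
      match index.get? reviewer with
      | some ts => (result.setdefault reviewer []).modify reviewer [] (fun l => l ++ ts)
      | none => result)
    (PySem.Dict.empty : PySem.Dict String (List String))).items

-- ===== PRECONDITION & SPEC =====
def Spec_find_papers_by_reviewers (titles : List String) (authors : List (List String)) (reviewers : List String) (out : List (String × List String)) : Prop := out = find_papers_by_reviewers_alt titles authors reviewers
instance (titles : List String) (authors : List (List String)) (reviewers : List String) (out : List (String × List String)) : Decidable (Spec_find_papers_by_reviewers titles authors reviewers out) := by unfold Spec_find_papers_by_reviewers; infer_instance

-- ===== CLAIM (what is proved, stated in full; the proofs are below) =====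
def Claim_equal_find_papers_by_reviewers : Prop := ∀ (titles : List String) (authors : List (List String)) (reviewers : List String), Dom_find_papers_by_reviewers titles authors reviewers → Spec_find_papers_by_reviewers titles authors reviewers (find_papers_by_reviewers titles authors reviewers)

-- ===== LEMMAS AND PROOFS =====

theorem fpbrFoldlExt {α β : Type} (f g : β → α → β) (h : ∀ b a, f b a = g b a) (l : List α) (b : β) :
    l.foldl f b = l.foldl g b := by
  induction l generalizing b with
  | nil => rfl
  | cons a l ih => rw [List.foldl_cons, List.foldl_cons, h, ih]

-- titles of the papers (title, author_list) in L whose author_list contains r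
def fpbrM (L : List (String × List String)) (r : String) : List String :=
  (L.filter (fun ta => r ∈ ta.2)).map (fun ta => ta.1)

-- append ts to r's entry (creating it if absent)
def fpbrApp (d : PySem.Dict String (List String)) (r : String) (ts : List String) : PySem.Dict String (List String) :=
  d.insert r (d.getD r [] ++ ts)

theorem fpbrApp_app (d : PySem.Dict String (List String)) (r : String) (ts ts' : List String) :
    fpbrApp (fpbrApp d r ts) r ts' = fpbrApp d r (ts ++ ts') := by
  simp [fpbrApp, PySem.Dict.getD_insert_self, PySem.Dict.insert_insert_self, List.append_assoc]

theorem fpbrApp_get?_ne (d : PySem.Dict String (List String)) (r r' : String) (ts : List String)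
    (h : r' ≠ r) : (fpbrApp d r ts).get? r' = d.get? r' := by
  simp [fpbrApp, PySem.Dict.get?_insert_of_ne, h]

theorem fpbrApp_getD_ne (d : PySem.Dict String (List String)) (r r' : String) (ts : List String)
    (h : r' ≠ r) : (fpbrApp d r ts).getD r' [] = d.getD r' [] := by
  simp [fpbrApp, PySem.Dict.getD_insert_of_ne, h]

-- the shared body: A's "if absent insert [] then append" and B's "setdefault then extend" are both fpbrApp
theorem fpbrBody_eq (d : PySem.Dict String (List String)) (r : String) (ts : List String) :
    (if d.contains r then d else d.insert r []).modify r [] (fun l => l ++ ts) = fpbrApp d r ts := by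
  by_cases h : d.contains r = true
  · simp [h, PySem.Dict.modify, fpbrApp]
  · simp only [Bool.not_eq_true] at h
    simp [PySem.Dict.modify, fpbrApp, PySem.Dict.getD_insert_self,
      PySem.Dict.insert_insert_self, PySem.Dict.getD_of_not_contains, h]

theorem fpbrBodyB_eq (d : PySem.Dict String (List String)) (r : String) (ts : List String) :
    (d.setdefault r []).modify r [] (fun l => l ++ ts) = fpbrApp d r ts := by
  rw [← fpbrBody_eq]
  by_cases h : d.contains r = true
  · simp [PySem.Dict.setdefault_of_contains, h]
  · simp only [Bool.not_eq_true] at h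
    simp [PySem.Dict.setdefault_of_not_contains, h]

-- A's inner loop over the papers, for one reviewer
theorem fpbrInnerA (L : List (String × List String)) (r : String)
    (d : PySem.Dict String (List String)) :
    L.foldl (fun d ta => if r ∈ ta.2 then fpbrApp d r [ta.1] else d) d
      = if fpbrM L r = [] then d else fpbrApp d r (fpbrM L r) := by
  induction L generalizing d with
  | nil => simp [fpbrM]
  | cons ta L ih =>
    by_cases h : r ∈ ta.2
    · have hM : fpbrM (ta :: L) r = ta.1 :: fpbrM L r := by simp [fpbrM, h]
      rw [List.foldl_cons, if_pos h, ih, hM]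
      by_cases h2 : fpbrM L r = []
      · simp [h2]
      · simp [h2, fpbrApp_app]
    · have hM : fpbrM (ta :: L) r = fpbrM L r := by simp [fpbrM, h]
      rw [List.foldl_cons, if_neg h, ih, hM]

-- one paper's contribution to the index, for any Nodup author list
theorem fpbrIdxPaper (S : List String) (hS : S.Nodup) (t : String)
    (idx : PySem.Dict String (List String)) (r : String) :
    (S.foldl (fun idx a => fpbrApp idx a [t]) idx).get? r
      = if r ∈ S then some (idx.getD r [] ++ [t]) else idx.get? r := by
  induction S generalizing idx with
  | nil => simp
  | cons a S ih =>
    rcases List.nodup_cons.mp hS with ⟨ha, hS'⟩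
    rw [List.foldl_cons, ih hS']
    by_cases h : r = a
    · subst h
      simp [ha, fpbrApp, PySem.Dict.get?_insert_self]
    · simp only [List.mem_cons, h, false_or]
      rw [fpbrApp_getD_ne _ _ _ _ h, fpbrApp_get?_ne _ _ _ _ h]

-- lookup in the index fold, starting from any dict
theorem fpbrIdxFold (L : List (String × List String)) (idx : PySem.Dict String (List String))
    (r : String) :
    (L.foldl (fun idx ta =>
        (PySem.Set.ofList ta.2).foldl (fun idx a => fpbrApp idx a [ta.1]) idx) idx).get? r
      = if fpbrM L r = [] then idx.get? r else some (idx.getD r [] ++ fpbrM L r) := by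
  induction L generalizing idx with
  | nil => simp [fpbrM]
  | cons ta L ih =>
    rw [List.foldl_cons, ih]
    have hmem : (r ∈ PySem.Set.ofList ta.2) ↔ r ∈ ta.2 := PySem.Set.mem_ofList ta.2 r
    have hget := fpbrIdxPaper (PySem.Set.ofList ta.2) (PySem.Set.nodup_ofList ta.2) ta.1 idx r
    by_cases h : r ∈ ta.2
    · have hM : fpbrM (ta :: L) r = ta.1 :: fpbrM L r := by simp [fpbrM, h]
      rw [hget]
      simp only [hmem, h, if_pos]
      have hgetD : (idx.insert r (idx.getD r [] ++ [ta.1])).getD r [] = idx.getD r [] ++ [ta.1] := by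
        simp [PySem.Dict.getD_insert_self]
      by_cases h2 : fpbrM L r = []
      · simp [h2, hM]
      · simp only [h2, if_false, hM]
        have : (PySem.Set.ofList ta.2).foldl (fun idx a => fpbrApp idx a [ta.1]) idx
            = (PySem.Set.ofList ta.2).foldl (fun idx a => fpbrApp idx a [ta.1]) idx := rfl
        -- rewrite getD via get? of the per-paper fold
        have hgd : ((PySem.Set.ofList ta.2).foldl (fun idx a => fpbrApp idx a [ta.1]) idx).getD r []
            = idx.getD r [] ++ [ta.1] := by
          rw [PySem.Dict.getD_eq_get?_getD, hget]
          simp [hmem, h]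
        rw [hgd]
        simp
    · have hM : fpbrM (ta :: L) r = fpbrM L r := by simp [fpbrM, h]
      have hg : ((PySem.Set.ofList ta.2).foldl (fun idx a => fpbrApp idx a [ta.1]) idx).get? r
          = idx.get? r := by rw [hget]; simp [hmem, h]
      have hgd : ((PySem.Set.ofList ta.2).foldl (fun idx a => fpbrApp idx a [ta.1]) idx).getD r []
          = idx.getD r [] := by
        rw [PySem.Dict.getD_eq_get?_getD, hg, PySem.Dict.getD_eq_get?_getD]
      rw [hM, hg, hgd]

theorem fpbrIndex_get? (titles : List String) (authors : List (List String)) (r : String) :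
    (fpbrIndex titles authors).get? r
      = if fpbrM (titles.zip authors) r = [] then none else some (fpbrM (titles.zip authors) r) := by
  unfold fpbrIndex
  have := fpbrIdxFold (titles.zip authors) PySem.Dict.empty r
  have hbody : ∀ (idx : PySem.Dict String (List String)) (ta : String × List String),
      (PySem.Set.ofList ta.2).foldl (fun index author =>
          (index.setdefault author []).modify author [] (fun l => l ++ [ta.1])) idx
        = (PySem.Set.ofList ta.2).foldl (fun idx a => fpbrApp idx a [ta.1]) idx := by
    intro idx ta
    apply fpbrFoldlExt
    intro d a
    exact fpbrBodyB_eq d a [ta.1]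
  calc ((titles.zip authors).foldl (fun index ta =>
          (PySem.Set.ofList ta.2).foldl (fun index author =>
            (index.setdefault author []).modify author [] (fun l => l ++ [ta.1])) index)
          PySem.Dict.empty).get? r
      = ((titles.zip authors).foldl (fun idx ta =>
          (PySem.Set.ofList ta.2).foldl (fun idx a => fpbrApp idx a [ta.1]) idx)
          PySem.Dict.empty).get? r := by
        congr 1
        apply fpbrFoldlExt
        intro d ta
        exact hbody d ta
    _ = _ := by
        rw [fpbrIdxFold]
        simp [PySem.Dict.get?_empty, PySem.Dict.getD_empty]

-- ===== VERDICT (by name: the statement is the Claim_ definition above) =====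
theorem find_papers_by_reviewers_spec : Claim_equal_find_papers_by_reviewers := by
  intro titles authors reviewers _
  unfold Spec_find_papers_by_reviewers find_papers_by_reviewers find_papers_by_reviewers_alt
  congr 1
  apply fpbrFoldlExt
  intro d r
  -- A's step for reviewer r
  have hA : (titles.zip authors).foldl (fun papers_by_reviewers ta =>
      if r ∈ ta.2 then
        (if papers_by_reviewers.contains r then papers_by_reviewers
         else papers_by_reviewers.insert r []).modify r [] (fun l => l ++ [ta.1])
      else papers_by_reviewers) d
      = if fpbrM (titles.zip authors) r = [] then d else fpbrApp d r (fpbrM (titles.zip authors) r) := by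
    rw [← fpbrInnerA]
    apply fpbrFoldlExt
    intro d' ta
    by_cases h : r ∈ ta.2
    · simp only [h, if_pos]
      exact fpbrBody_eq d' r [ta.1]
    · simp [h]
  rw [hA, fpbrIndex_get?]
  by_cases h2 : fpbrM (titles.zip authors) r = []
  · simp [h2]
  · rw [if_neg h2, if_neg h2]
    exact (fpbrBodyB_eq d r _).symm
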